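-- pv_equiv track=rewrite | github.com/sharadgupta27/bibtex-clean | bibtex-clean.py | cleanBibtexFile
-- ===== SOURCE A (Python) =====
-- fields_to_remove = [
--     "abstract", "file", "archivePrefix", "keywords", "eprint", "mendeley-groups",
--     "link", "keyword", "mendeley-tags", "annote", "pmid", "chapter", "institution", "month"
-- ]
--
-- def cleanBibtexFile(content):
--     cleaned_content = []
--     current_entry = []
--     in_entry = False
--     has_journal = False
--
--     for line in content:
--         if line.strip().startswith('@'):
--             if in_entry:
--                 cleaned_content.extend(process_entry(current_entry, has_journal))
--                 cleaned_content.append('\n')  # Add a blank line between entries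
--             current_entry = [line]
--             in_entry = True
--             has_journal = False
--         elif in_entry:
--             if line.strip().startswith('journal ='):
--                 has_journal = True
--             current_entry.append(line)
--         else:
--             cleaned_content.append(line)
--
--     if in_entry:
--         cleaned_content.extend(process_entry(current_entry, has_journal))
--         cleaned_content.append('\n')  # Add a blank line after the last entry
--
--     return cleaned_content
--
-- def process_entry(entry, has_journal):
--     processed_entry = []
--     for line in entry:
--         if any(line.strip().startswith(field + ' =') for field in fields_to_remove):
--             continue
--         if has_journal and line.strip().startswith('url ='):
--             continue
--         processed_entry.append(line)
--     return processed_entry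
-- ===== SOURCE B (Python) =====
-- fields_to_remove = [
--     "abstract", "file", "archivePrefix", "keywords", "eprint", "mendeley-groups",
--     "link", "keyword", "mendeley-tags", "annote", "pmid", "chapter", "institution", "month"
-- ]
--
--
-- def _starts_entry(line):
--     return line.strip().startswith('@')
--
--
-- def _split_blocks(lines):
--     """Split lines into (preamble, blocks): preamble = lines before the first
--     '@' line; each block starts at an '@' line and runs to the next one."""
--     preamble = []
--     i = 0
--     while i < len(lines) and not _starts_entry(lines[i]):
--         preamble.append(lines[i])
--         i += 1
--     blocks = []
--     while i < len(lines):
--         j = i + 1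
--         while j < len(lines) and not _starts_entry(lines[j]):
--             j += 1
--         blocks.append(lines[i:j])
--         i = j
--     return preamble, blocks
--
--
-- def _render_block(block):
--     has_journal = any(l.strip().startswith('journal =') for l in block[1:])
--     kept = [
--         l for l in block
--         if not any(l.strip().startswith(f + ' =') for f in fields_to_remove)
--         and not (has_journal and l.strip().startswith('url ='))
--     ]
--     return kept + ['\n']
--
--
-- def cleanBibtexFile(content):
--     preamble, blocks = _split_blocks(content)
--     out = list(preamble)
--     for b in blocks:
--         out.extend(_render_block(b))
--     return out
-- ===== Notes on version B (the rewrite author's own statement) =====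
-- stated objective: alternative
-- what changed: Replaced A's single stateful streaming loop (in_entry/current_entry/has_journal flags with an end-of-loop flush) by a pure pipeline: split the input once into a preamble and '@'-delimited entry blocks, then render each block independently by filtering its lines.
import Mathlib
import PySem

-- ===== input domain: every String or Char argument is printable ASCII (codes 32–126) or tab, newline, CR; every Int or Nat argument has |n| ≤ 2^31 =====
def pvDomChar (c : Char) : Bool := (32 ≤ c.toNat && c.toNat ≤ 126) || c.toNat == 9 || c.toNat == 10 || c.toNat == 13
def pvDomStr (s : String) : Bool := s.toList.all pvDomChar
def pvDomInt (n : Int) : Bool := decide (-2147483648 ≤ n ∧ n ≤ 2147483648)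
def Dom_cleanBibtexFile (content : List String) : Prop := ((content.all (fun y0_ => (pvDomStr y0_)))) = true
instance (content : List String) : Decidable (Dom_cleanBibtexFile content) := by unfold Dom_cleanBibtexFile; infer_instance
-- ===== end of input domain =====

-- B re-groups the input into preamble + entry blocks and renders each block by filtering
-- (objective: simpler pure pipeline instead of A's stateful streaming accumulator); same return value.

def fieldsToRemove : List String := [
  "abstract", "file", "archivePrefix", "keywords", "eprint", "mendeley-groups",
  "link", "keyword", "mendeley-tags", "annote", "pmid", "chapter", "institution", "month"]

-- line.strip().startswith('@') etc. (shared line predicates, used verbatim by both Pythons)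
def isAt (l : String) : Bool := PySem.Str.startswith (PySem.Str.strip l) "@"
def isJournal (l : String) : Bool := PySem.Str.startswith (PySem.Str.strip l) "journal ="
def isUrl (l : String) : Bool := PySem.Str.startswith (PySem.Str.strip l) "url ="
def isRemovedField (l : String) : Bool :=
  fieldsToRemove.any (fun f => PySem.Str.startswith (PySem.Str.strip l) (f ++ " ="))

-- ===== PORT A =====
-- process_entry: the for-loop with two 'continue's, as a fold appending to processed_entry
def processEntry (entry : List String) (hasJournal : Bool) : List String :=
  entry.foldl (fun acc l =>
    if isRemovedField l then acc
    else if hasJournal && isUrl l then acc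
    else acc ++ [l]) []

-- A's loop state: (cleaned_content, current_entry, in_entry, has_journal)
def stepA (st : List String × List String × Bool × Bool) (line : String) :
    List String × List String × Bool × Bool :=
  let (cleaned, cur, inE, hasJ) := st
  if isAt line then
    if inE then (cleaned ++ processEntry cur hasJ ++ ["\n"], [line], true, false)
    else (cleaned, [line], true, false)
  else if inE then (cleaned, cur ++ [line], true, hasJ || isJournal line)
  else (cleaned ++ [line], cur, inE, hasJ)

def cleanBibtexFile (content : List String) : List String :=
  let st := content.foldl stepA ([], [], false, false)
  let (cleaned, cur, inE, hasJ) := st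
  if inE then cleaned ++ processEntry cur hasJ ++ ["\n"] else cleaned

-- ===== PORT B =====
-- _split_blocks second phase: group the '@'-delimited tail into blocks
def pvBlocks : List String → List (List String)
  | [] => []
  | l :: ls =>
      (l :: ls.takeWhile (fun x => !isAt x)) :: pvBlocks (ls.dropWhile (fun x => !isAt x))
  termination_by ls => ls.length
  decreasing_by
    simpa [Nat.lt_succ_iff] using List.length_dropWhile_le (fun x => !isAt x) ls

-- _render_block
def pvRenderBlock (b : List String) : List String :=
  let hasJournal := (b.drop 1).any isJournal
  b.filter (fun l => !isRemovedField l && !(hasJournal && isUrl l)) ++ ["\n"]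

def cleanBibtexFile_alt (content : List String) : List String :=
  let preamble := content.takeWhile (fun l => !isAt l)
  let blocks := pvBlocks (content.dropWhile (fun l => !isAt l))
  preamble ++ (blocks.map pvRenderBlock).flatten

-- ===== PRECONDITION & SPEC =====
def Spec_cleanBibtexFile (content : List String) (out : List String) : Prop := out = cleanBibtexFile_alt content
instance (content : List String) (out : List String) : Decidable (Spec_cleanBibtexFile content out) := by unfold Spec_cleanBibtexFile; infer_instance

-- ===== CLAIM (what is proved, stated in full; the proofs are below) =====
def Claim_equal_cleanBibtexFile : Prop := ∀ (content : List String), Dom_cleanBibtexFile content → Spec_cleanBibtexFile content (cleanBibtexFile content)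

-- ===== LEMMAS AND PROOFS =====

@[simp] theorem pvBlocks_nil : pvBlocks [] = [] := by rw [pvBlocks.eq_def]

theorem pvBlocks_cons (l : String) (ls : List String) :
    pvBlocks (l :: ls) =
      (l :: ls.takeWhile (fun x => !isAt x)) :: pvBlocks (ls.dropWhile (fun x => !isAt x)) := by
  rw [pvBlocks.eq_def]

-- A's process_entry is B's filter
theorem processEntry_eq_filter (entry : List String) (h : Bool) :
    processEntry entry h = entry.filter (fun l => !isRemovedField l && !(h && isUrl l)) := by
  unfold processEntry
  have hfun : (fun (acc : List String) l =>
      if isRemovedField l then acc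
      else if h && isUrl l then acc
      else acc ++ [l]) =
      (fun (acc : List String) l =>
        if (!isRemovedField l && !(h && isUrl l)) = true then acc ++ [l] else acc) := by
    funext acc l
    by_cases h1 : isRemovedField l <;> by_cases h2 : h && isUrl l <;> simp [h1, h2]
  rw [hfun, PySem.List.foldl_append_if_eq_filter]
  simp

-- A's trailing flush, applied to a loop state
def finishA (st : List String × List String × Bool × Bool) : List String :=
  let (cleaned, cur, inE, hasJ) := st
  if inE then cleaned ++ processEntry cur hasJ ++ ["\n"] else cleaned

-- inside an entry: A's loop flushes cur ++ (lines up to the next '@') and continues with the blocks of the rest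
theorem entry_phase : ∀ (n : Nat) (ls : List String), ls.length ≤ n →
    ∀ (acc cur : List String) (hJ : Bool),
    finishA (ls.foldl stepA (acc, cur, true, hJ)) =
      acc ++ processEntry (cur ++ ls.takeWhile (fun x => !isAt x))
              (hJ || (ls.takeWhile (fun x => !isAt x)).any isJournal) ++ ["\n"]
          ++ ((pvBlocks (ls.dropWhile (fun x => !isAt x))).map pvRenderBlock).flatten := by
  intro n
  induction n with
  | zero =>
      intro ls hls acc cur hJ
      have : ls = [] := List.length_eq_zero_iff.mp (Nat.le_zero.mp hls)
      subst this
      simp [finishA]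
  | succ n ih =>
      intro ls hls acc cur hJ
      cases ls with
      | nil => simp [finishA]
      | cons l ls =>
          by_cases hAt : isAt l = true
          · have hrec := ih ls (by simpa using Nat.succ_le_succ_iff.mp hls)
              (acc ++ processEntry cur hJ ++ ["\n"]) [l] false
            simp only [List.foldl_cons, stepA, hAt, if_true]
            rw [hrec]
            simp [hAt, pvBlocks_cons,
              pvRenderBlock, processEntry_eq_filter]
          · have hAt' : isAt l = false := by simpa using hAt
            have hrec := ih ls (by simpa using Nat.succ_le_succ_iff.mp hls)
              acc (cur ++ [l]) (hJ || isJournal l)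
            simp only [List.foldl_cons, stepA, hAt', Bool.false_eq_true, if_false, if_true]
            rw [hrec]
            simp [hAt', Bool.or_assoc]

-- before the first '@': A copies lines through, then the entry phase takes over
theorem pre_phase : ∀ (ls : List String) (acc cur : List String) (hJ : Bool),
    finishA (ls.foldl stepA (acc, cur, false, hJ)) =
      acc ++ ls.takeWhile (fun x => !isAt x)
          ++ ((pvBlocks (ls.dropWhile (fun x => !isAt x))).map pvRenderBlock).flatten := by
  intro ls
  induction ls with
  | nil => intro acc cur hJ; simp [finishA]
  | cons l ls ih =>
      intro acc cur hJ
      by_cases hAt : isAt l = true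
      · have hrec := entry_phase ls.length ls le_rfl acc [l] false
        simp only [List.foldl_cons, stepA, hAt, if_true, Bool.false_eq_true, if_false]
        rw [hrec]
        simp [hAt, pvBlocks_cons,
          pvRenderBlock, processEntry_eq_filter]
      · have hAt' : isAt l = false := by simpa using hAt
        have hrec := ih (acc ++ [l]) cur hJ
        simp only [List.foldl_cons, stepA, hAt', Bool.false_eq_true, if_false]
        rw [hrec]
        simp [hAt']

-- ===== VERDICT (by name: the statement is the Claim_ definition above) =====
theorem cleanBibtexFile_spec : Claim_equal_cleanBibtexFile := by
  intro content _
  show cleanBibtexFile content = cleanBibtexFile_alt content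
  have h := pre_phase content [] [] false
  simpa [cleanBibtexFile, finishA, cleanBibtexFile_alt] using h
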